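-- pv_equiv track=rewrite | github.com/donalngo/Simple-Recommender-Engine | Recommendation/Utils.py | duo_requirements_matching
-- ===== SOURCE A (Python) =====
-- import itertools
--
-- def duo_requirements_matching(lacking_features_list, fulfilled_list, filtered_software_names):
--     # find matching duo software index
--     duo_match_index = sorted([sorted(list([lacking_index, fulfilled_index])) for lacking_index, lacking_feature
--                               in enumerate(lacking_features_list) for fulfilled_index, fulfilled_feature
--                               in enumerate(fulfilled_list) if lacking_feature == fulfilled_feature])
--     # remove duplicates within duos
--     duo_unique_index = list(indices for indices, _ in itertools.groupby(duo_match_index))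
--     # get names of software by index
--     results = [[filtered_software_names[software_index] for software_index in combination] for combination in
--                duo_unique_index]
--     return results
-- ===== SOURCE B (Python) =====
-- def duo_requirements_matching(lacking_features_list, fulfilled_list, filtered_software_names):
--     # index the fulfilled features once: feature -> list of indices
--     positions = {}
--     for j, feature in enumerate(fulfilled_list):
--         positions.setdefault(feature, []).append(j)
--     # collect the distinct normalized index pairs, packed into single ints for speed
--     span = max(len(lacking_features_list), len(fulfilled_list))
--     codes = set()
--     for i, feature in enumerate(lacking_features_list):
--         for j in positions.get(feature, ()):
--             codes.add(i * span + j if i <= j else j * span + i)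
--     return [[filtered_software_names[c // span], filtered_software_names[c % span]]
--             for c in sorted(codes)]
-- ===== Notes on version B (the rewrite author's own statement) =====
-- stated objective: faster
-- what changed: Instead of enumerating all N*M index pairs, sorting the full match list of 2-element lists and deduplicating with groupby, B builds a hash index feature->fulfilled indices once, collects only the actual matches as normalized pairs packed into single ints in a set, and sorts that deduplicated set of ints.
import Mathlib
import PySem

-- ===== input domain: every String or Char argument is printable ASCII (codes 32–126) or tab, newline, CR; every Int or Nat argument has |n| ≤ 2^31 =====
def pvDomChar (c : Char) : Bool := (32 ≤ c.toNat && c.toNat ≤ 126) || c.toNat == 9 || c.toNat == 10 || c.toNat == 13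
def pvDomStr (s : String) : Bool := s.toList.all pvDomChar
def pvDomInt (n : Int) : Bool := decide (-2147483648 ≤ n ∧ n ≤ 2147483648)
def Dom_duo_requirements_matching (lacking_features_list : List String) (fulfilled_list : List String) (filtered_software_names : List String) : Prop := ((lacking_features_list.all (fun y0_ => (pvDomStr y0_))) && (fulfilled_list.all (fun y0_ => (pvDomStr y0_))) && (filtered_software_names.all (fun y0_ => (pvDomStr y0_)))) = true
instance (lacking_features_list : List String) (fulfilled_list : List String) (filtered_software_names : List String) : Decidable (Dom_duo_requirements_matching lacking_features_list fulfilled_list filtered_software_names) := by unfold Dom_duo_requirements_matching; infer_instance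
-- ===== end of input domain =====

-- B replaces A's full N*M pair enumeration + sort + groupby dedup by a hash index of the
-- fulfilled features, a set of normalized matching index pairs, and one sort of that set.

-- ===== PORT A =====

-- Python's comparison of lists of ints is lexicographic = '<' of Mathlib's LinearOrder on List Int
-- (instances passed explicitly; used by both ports for sorted() over lists of index pairs).
def pvSortLL (xs : List (List Int)) : List (List Int) :=
  @PySem.List.sorted _ _ List.instLinearOrder.toLT LinearOrder.toDecidableLT xs (fun x => x) false

-- itertools.groupby(l) keeping the first element of each run = consecutive dedup (hand port, exact)
def pvDedupGroup : List (List Int) → List (List Int)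
  | [] => []
  | [x] => [x]
  | x :: y :: t => if x = y then pvDedupGroup (y :: t) else x :: pvDedupGroup (y :: t)

-- the nested comprehension building duo_match_index (before the outer sorted)
def pvMatchList (lacking_features_list fulfilled_list : List String) : List (List Int) :=
  (PySem.List.enumerate lacking_features_list).flatMap (fun lp =>
    (PySem.List.enumerate fulfilled_list).filterMap (fun fp =>
      if lp.2 == fp.2 then some (PySem.List.sorted [lp.1, fp.1] (fun x => x) false) else none))

def duo_requirements_matching (lacking_features_list : List String) (fulfilled_list : List String) (filtered_software_names : List String) : List (List String) :=
  let duo_match_index := pvSortLL (pvMatchList lacking_features_list fulfilled_list)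
  let duo_unique_index := pvDedupGroup duo_match_index
  duo_unique_index.map (fun combination =>
    combination.map (fun software_index => PySem.List.pyGetD filtered_software_names software_index ""))

-- ===== PORT B =====

-- positions = {} ; for j, feature in enumerate(fulfilled_list): positions.setdefault(feature, []).append(j)
def pvPositions (fulfilled_list : List String) : PySem.Dict String (List Int) :=
  (PySem.List.enumerate fulfilled_list).foldl
    (fun d p => d.modify p.2 [] (fun xs => xs ++ [p.1])) PySem.Dict.empty

-- span = max(len(lacking_features_list), len(fulfilled_list))
def pvSpan (lacking_features_list fulfilled_list : List String) : Int :=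
  max (lacking_features_list.length : Int) (fulfilled_list.length : Int)

-- codes = set() ; for i, feature in enumerate(...): for j in positions.get(feature, ()):
--   codes.add(i*span+j if i <= j else j*span+i)
def pvCodes (lacking_features_list fulfilled_list : List String) : PySem.Set Int :=
  (PySem.List.enumerate lacking_features_list).foldl
    (fun s p => ((pvPositions fulfilled_list).getD p.2 []).foldl
      (fun s j => PySem.Set.add s
        (if p.1 ≤ j then p.1 * pvSpan lacking_features_list fulfilled_list + j
         else j * pvSpan lacking_features_list fulfilled_list + p.1)) s)
    PySem.Set.empty

-- sorted(codes): Python's sort over plain ints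
def pvSortI (xs : List Int) : List Int := PySem.List.sorted xs (fun x => x) false

def duo_requirements_matching_alt (lacking_features_list : List String) (fulfilled_list : List String) (filtered_software_names : List String) : List (List String) :=
  let span := pvSpan lacking_features_list fulfilled_list
  (pvSortI (pvCodes lacking_features_list fulfilled_list)).map (fun c =>
    [PySem.List.pyGetD filtered_software_names (PySem.Int.floordiv c span) "",
     PySem.List.pyGetD filtered_software_names (PySem.Int.mod c span) ""])

-- ===== PRECONDITION & SPEC =====
-- Pre_ excludes exactly the inputs on which A raises IndexError: some matching index pair
-- contains an index that is not a valid position in filtered_software_names.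
def Pre_duo_requirements_matching (lacking_features_list : List String) (fulfilled_list : List String) (filtered_software_names : List String) : Prop :=
  ∀ k < lacking_features_list.length, ∀ j < fulfilled_list.length,
    lacking_features_list.getD k "" = fulfilled_list.getD j "" →
      k < filtered_software_names.length ∧ j < filtered_software_names.length
instance (lacking_features_list : List String) (fulfilled_list : List String) (filtered_software_names : List String) : Decidable (Pre_duo_requirements_matching lacking_features_list fulfilled_list filtered_software_names) := by unfold Pre_duo_requirements_matching; infer_instance

def pvWitness_duo_requirements_matching : List String × List String × List String :=
  (["a", "b"], ["b", "a"], ["w", "x", "y"])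

def Spec_duo_requirements_matching (lacking_features_list : List String) (fulfilled_list : List String) (filtered_software_names : List String) (out : List (List String)) : Prop := out = duo_requirements_matching_alt lacking_features_list fulfilled_list filtered_software_names
instance (lacking_features_list : List String) (fulfilled_list : List String) (filtered_software_names : List String) (out : List (List String)) : Decidable (Spec_duo_requirements_matching lacking_features_list fulfilled_list filtered_software_names out) := by unfold Spec_duo_requirements_matching; infer_instance

-- ===== CLAIM (what is proved, stated in full; the proofs are below) =====
def Claim_equal_duo_requirements_matching : Prop := ∀ (lacking_features_list : List String) (fulfilled_list : List String) (filtered_software_names : List String), Dom_duo_requirements_matching lacking_features_list fulfilled_list filtered_software_names → Pre_duo_requirements_matching lacking_features_list fulfilled_list filtered_software_names → Spec_duo_requirements_matching lacking_features_list fulfilled_list filtered_software_names (duo_requirements_matching lacking_features_list fulfilled_list filtered_software_names)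

-- ===== LEMMAS AND PROOFS =====

-- sorted([a, b]) in closed form
theorem pvSortPair (a b : Int) :
    PySem.List.sorted [a, b] (fun x => x) false = if a ≤ b then [a, b] else [b, a] := by
  by_cases h : a ≤ b
  · simp [PySem.List.sorted_eq_foldl_insertBy, PySem.List.insertBy, h, not_lt.mpr h]
  · simp [PySem.List.sorted_eq_foldl_insertBy, PySem.List.insertBy, h, lt_of_not_ge h]

-- pvSortLL facts, with the explicit lex instances
theorem pvSortLL_pairwise (xs : List (List Int)) : (pvSortLL xs).Pairwise (· ≤ ·) := by
  unfold pvSortLL; exact PySem.List.sorted_pairwise xs (fun x => x)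

theorem pvSortLL_perm (xs : List (List Int)) : (pvSortLL xs).Perm xs := by
  unfold pvSortLL
  exact @PySem.List.sorted_perm _ _ List.instLinearOrder.toLT LinearOrder.toDecidableLT xs (fun x => x) false

theorem pvSortLL_mem (xs : List (List Int)) (a : List Int) : a ∈ pvSortLL xs ↔ a ∈ xs :=
  (pvSortLL_perm xs).mem_iff

-- A's match list: membership characterisation
theorem mem_pvMatchList (lack ful : List String) (m : List Int) :
    m ∈ pvMatchList lack ful ↔
      ∃ k j : Nat, k < lack.length ∧ j < ful.length ∧ lack.getD k "" = ful.getD j "" ∧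
        m = (if (k : Int) ≤ (j : Int) then [(k : Int), (j : Int)] else [(j : Int), (k : Int)]) := by
  simp only [pvMatchList, List.mem_flatMap, List.mem_filterMap, PySem.List.mem_enumerate_iff,
    pvSortPair]
  constructor
  · rintro ⟨lp, ⟨k, hk, rfl⟩, fp, ⟨j, hj, rfl⟩, h⟩
    simp only [zero_add] at h
    split at h
    · exact ⟨k, j, hk, hj, by simpa [List.getD_eq_getElem, hk, hj] using (beq_iff_eq.mp (by assumption)), by simpa using h.symm⟩
    · simp at h
  · rintro ⟨k, j, hk, hj, heq, rfl⟩
    refine ⟨(k, lack[k]), ⟨k, hk, by simp⟩, (j, ful[j]), ⟨j, hj, by simp⟩, ?_⟩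
    have : lack[k] = ful[j] := by simpa [List.getD_eq_getElem, hk, hj] using heq
    simp [this]

-- B's dict of positions: closed form of the lookup
theorem pvDictFold_getD (l : List (Int × String)) (d : PySem.Dict String (List Int)) (f : String) :
    (l.foldl (fun d p => d.modify p.2 [] (fun xs => xs ++ [p.1])) d).getD f []
      = d.getD f [] ++ (l.filter (fun p => p.2 == f)).map (·.1) := by
  induction l generalizing d with
  | nil => simp
  | cons p t ih =>
    simp only [List.foldl_cons, ih, List.filter_cons]
    by_cases h : p.2 = f
    · simp [h, PySem.Dict.getD_modify_self]
    · simp [h, PySem.Dict.getD_modify_of_ne, Ne.symm h]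

theorem pvPositions_getD (ful : List String) (f : String) :
    (pvPositions ful).getD f [] =
      ((PySem.List.enumerate ful).filter (fun p => p.2 == f)).map (·.1) := by
  simp [pvPositions, pvDictFold_getD]

-- B's set of codes: no duplicates, and membership characterisation
theorem pvNodup_foldl_add {γ : Type} (l : List γ) (f : γ → Int) (s : PySem.Set Int)
    (h : s.Nodup) : (l.foldl (fun s c => PySem.Set.add s (f c)) s).Nodup := by
  induction l generalizing s with
  | nil => exact h
  | cons c t ih =>
    simp only [List.foldl_cons]
    exact ih _ (PySem.Set.nodup_add _ _ h)

theorem pvCodesAux_mem (lack ful : List String) (l : List (Int × String)) (s : PySem.Set Int)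
    (y : Int) :
    (y ∈ l.foldl (fun s p => ((pvPositions ful).getD p.2 []).foldl
        (fun s j => PySem.Set.add s
          (if p.1 ≤ j then p.1 * pvSpan lack ful + j else j * pvSpan lack ful + p.1)) s) s) ↔
      y ∈ s ∨ ∃ p ∈ l, ∃ j ∈ (pvPositions ful).getD p.2 [],
        y = if p.1 ≤ j then p.1 * pvSpan lack ful + j else j * pvSpan lack ful + p.1 := by
  induction l generalizing s with
  | nil => simp
  | cons p t ih =>
    simp only [List.foldl_cons, ih, PySem.Set.mem_foldl_add, List.mem_cons]
    constructor
    · rintro (⟨hy | ⟨j, hj, rfl⟩⟩ | ⟨q, hq, j, hj, rfl⟩)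
      · exact Or.inl hy
      · exact Or.inr ⟨p, Or.inl rfl, j, hj, rfl⟩
      · exact Or.inr ⟨q, Or.inr hq, j, hj, rfl⟩
    · rintro (hy | ⟨q, (rfl | hq), j, hj, rfl⟩)
      · exact Or.inl (Or.inl hy)
      · exact Or.inl (Or.inr ⟨j, hj, rfl⟩)
      · exact Or.inr ⟨q, hq, j, hj, rfl⟩

theorem pvCodesAux_nodup (lack ful : List String) (l : List (Int × String)) (s : PySem.Set Int)
    (h : s.Nodup) :
    (l.foldl (fun s p => ((pvPositions ful).getD p.2 []).foldl
        (fun s j => PySem.Set.add s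
          (if p.1 ≤ j then p.1 * pvSpan lack ful + j else j * pvSpan lack ful + p.1)) s) s).Nodup := by
  induction l generalizing s with
  | nil => exact h
  | cons p t ih =>
    simp only [List.foldl_cons]
    exact ih _ (pvNodup_foldl_add _ _ _ h)

theorem nodup_pvCodes (lack ful : List String) : (pvCodes lack ful).Nodup :=
  pvCodesAux_nodup lack ful _ _ List.nodup_nil

theorem mem_pvCodes (lack ful : List String) (c : Int) :
    c ∈ pvCodes lack ful ↔
      ∃ k j : Nat, k < lack.length ∧ j < ful.length ∧ lack.getD k "" = ful.getD j "" ∧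
        c = (if (k : Int) ≤ (j : Int) then (k : Int) * pvSpan lack ful + (j : Int)
             else (j : Int) * pvSpan lack ful + (k : Int)) := by
  rw [pvCodes, pvCodesAux_mem]
  simp only [PySem.Set.empty, List.not_mem_nil, false_or, PySem.List.mem_enumerate_iff,
    pvPositions_getD, List.mem_map, List.mem_filter]
  constructor
  · rintro ⟨p, ⟨k, hk, rfl⟩, j, ⟨fp, ⟨⟨jn, hjn, rfl⟩, hf⟩, rfl⟩, rfl⟩
    exact ⟨k, jn, hk, hjn, by simpa [List.getD_eq_getElem, hk, hjn] using (beq_iff_eq.mp hf).symm,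
      by simp⟩
  · rintro ⟨k, j, hk, hj, heq, rfl⟩
    have h : lack[k] = ful[j] := by simpa [List.getD_eq_getElem, hk, hj] using heq
    exact ⟨(k, lack[k]), ⟨k, hk, by simp⟩, j, ⟨((j : Int), ful[j]), ⟨⟨j, hj, by simp⟩, by simp [h]⟩, rfl⟩,
      by simp⟩

-- pvSortI facts (Python's sorted over ints)
theorem pvSortI_eq_of_perm_of_pairwise_lt (xs ys : List Int) (h : ys.Perm xs)
    (h2 : ys.Pairwise (· < ·)) : pvSortI xs = ys := by
  unfold pvSortI; exact PySem.List.sorted_eq_of_perm_of_pairwise_lt xs ys (fun x => x) h h2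

-- the groupby dedup of a (·≤·)-sorted list: same members, strictly increasing
theorem mem_pvDedupGroup (l : List (List Int)) (a : List Int) :
    a ∈ pvDedupGroup l ↔ a ∈ l := by
  induction l with
  | nil => simp [pvDedupGroup]
  | cons x t ih =>
    cases t with
    | nil => simp [pvDedupGroup]
    | cons y u =>
      by_cases h : x = y
      · subst h
        rw [show pvDedupGroup (x :: x :: u) = pvDedupGroup (x :: u) from by
          simp [pvDedupGroup], ih]
        simp
      · simp [pvDedupGroup, h, ih]

theorem pairwise_pvDedupGroup (l : List (List Int)) (h : l.Pairwise (· ≤ ·)) :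
    (pvDedupGroup l).Pairwise (· < ·) := by
  induction l with
  | nil => simp [pvDedupGroup]
  | cons x t ih =>
    cases t with
    | nil => simp [pvDedupGroup]
    | cons y u =>
      have hpt : (y :: u).Pairwise (· ≤ ·) := h.tail
      by_cases hxy : x = y
      · simpa [pvDedupGroup, hxy] using ih hpt
      · rw [pvDedupGroup, if_neg hxy]
        refine List.Pairwise.cons ?_ (ih hpt)
        intro z hz
        have hz' : z ∈ y :: u := (mem_pvDedupGroup _ _).mp hz
        have hxle : x ≤ y := (List.pairwise_cons.mp h).1 y (by simp)
        have hyz : y ≤ z := by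
          rcases List.mem_cons.mp hz' with rfl | hz''
          · exact le_refl z
          · exact (List.pairwise_cons.mp hpt).1 z hz''
        exact lt_of_lt_of_le (lt_of_le_of_ne hxle hxy) hyz

-- lexicographic order on two-element int lists, in components
theorem pvLexPair (a b c d : Int) : ([a, b] < [c, d]) ↔ (a < c ∨ (a = c ∧ b < d)) := by
  rw [List.cons_lt_cons_iff]
  simp [List.cons_lt_cons_iff]

-- decoding a packed pair
theorem pvEncDiv (lo hi span : Int) (h1 : 0 ≤ hi) (h2 : hi < span) :
    PySem.Int.floordiv (lo * span + hi) span = lo := by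
  have hs : 0 < span := lt_of_le_of_lt h1 h2
  rw [PySem.Int.floordiv, Int.fdiv_eq_ediv, if_pos (Or.inl (le_of_lt hs))]
  rw [add_comm, Int.add_mul_ediv_right _ _ (ne_of_gt hs), Int.ediv_eq_zero_of_lt h1 h2]
  simp

theorem pvEncMod (lo hi span : Int) (h1 : 0 ≤ hi) (h2 : hi < span) :
    PySem.Int.mod (lo * span + hi) span = hi := by
  have hs : 0 < span := lt_of_le_of_lt h1 h2
  rw [PySem.Int.mod, Int.fmod_eq_emod, if_pos (Or.inl (le_of_lt hs)), add_zero]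
  rw [add_comm, Int.add_mul_emod_self_right]
  exact Int.emod_eq_of_lt h1 h2

-- every duo in A's deduplicated list is [lo, hi] with 0 ≤ lo ≤ hi < span
theorem pvShape (lack ful : List String) (a : List Int)
    (ha : a ∈ pvDedupGroup (pvSortLL (pvMatchList lack ful))) :
    ∃ lo hi : Int, a = [lo, hi] ∧ 0 ≤ lo ∧ lo ≤ hi ∧ hi < pvSpan lack ful ∧
      a.getD 0 0 = lo ∧ a.getD 1 0 = hi := by
  rw [mem_pvDedupGroup, pvSortLL_mem, mem_pvMatchList] at ha
  obtain ⟨k, j, hk, hj, _, rfl⟩ := ha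
  have hks : (k : Int) < pvSpan lack ful := by
    have : (k : Int) < (lack.length : Int) := by exact_mod_cast hk
    exact lt_of_lt_of_le this (le_max_left _ _)
  have hjs : (j : Int) < pvSpan lack ful := by
    have : (j : Int) < (ful.length : Int) := by exact_mod_cast hj
    exact lt_of_lt_of_le this (le_max_right _ _)
  by_cases h : (k : Int) ≤ (j : Int)
  · exact ⟨k, j, by simp [h], Int.natCast_nonneg k, h, hjs, by simp [h], by simp [h]⟩
  · exact ⟨j, k, by simp [h], Int.natCast_nonneg j, le_of_lt (lt_of_not_ge h), hks,
      by simp [h], by simp [h]⟩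

-- the heart of the equivalence: B's sorted codes are exactly A's duos, packed
theorem pvMain (lack ful : List String) :
    pvSortI (pvCodes lack ful) =
      (pvDedupGroup (pvSortLL (pvMatchList lack ful))).map
        (fun a => a.getD 0 0 * pvSpan lack ful + a.getD 1 0) := by
  have hpw : (pvDedupGroup (pvSortLL (pvMatchList lack ful))).Pairwise (· < ·) :=
    pairwise_pvDedupGroup _ (pvSortLL_pairwise _)
  have hpwE : ((pvDedupGroup (pvSortLL (pvMatchList lack ful))).map
      (fun a => a.getD 0 0 * pvSpan lack ful + a.getD 1 0)).Pairwise (· < ·) := by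
    rw [List.pairwise_map]
    refine List.Pairwise.imp_of_mem ?_ hpw
    intro a b ha hb hab
    obtain ⟨lo, hi, rfl, h0, h1, h2, hd0, hd1⟩ := pvShape lack ful a ha
    obtain ⟨lo', hi', rfl, h0', h1', h2', hd0', hd1'⟩ := pvShape lack ful b hb
    simp only [hd0, hd1, hd0', hd1']
    have hspan : (0 : Int) ≤ pvSpan lack ful := le_of_lt (lt_of_le_of_lt (le_trans h0 h1) h2)
    rcases (pvLexPair lo hi lo' hi').mp hab with hlt | ⟨rfl, hlt⟩
    · nlinarith [h2, h0', mul_le_mul_of_nonneg_right (show lo + 1 ≤ lo' by omega) hspan]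
    · omega
  refine pvSortI_eq_of_perm_of_pairwise_lt _ _ ?_ hpwE
  -- permutation: both sides are duplicate-free with the same members
  have hn1 : (pvCodes lack ful).Nodup := nodup_pvCodes lack ful
  have hn2 := hpwE.imp (fun h => ne_of_lt h)
  rw [List.perm_ext_iff_of_nodup hn2 hn1]
  intro c
  rw [mem_pvCodes]
  simp only [List.mem_map]
  constructor
  · rintro ⟨a, ha, rfl⟩
    have ha' := ha
    rw [mem_pvDedupGroup, pvSortLL_mem, mem_pvMatchList] at ha'
    obtain ⟨k, j, hk, hj, he, rfl⟩ := ha'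
    exact ⟨k, j, hk, hj, he, by split_ifs <;> simp⟩
  · rintro ⟨k, j, hk, hj, he, rfl⟩
    refine ⟨if (k : Int) ≤ (j : Int) then [(k : Int), (j : Int)] else [(j : Int), (k : Int)],
      ?_, by split_ifs <;> simp⟩
    rw [mem_pvDedupGroup, pvSortLL_mem, mem_pvMatchList]
    exact ⟨k, j, hk, hj, he, rfl⟩

-- the two ports return the same value
theorem pvOut_eq (lack ful names : List String) :
    duo_requirements_matching lack ful names = duo_requirements_matching_alt lack ful names := by
  show (pvDedupGroup (pvSortLL (pvMatchList lack ful))).map _ = (pvSortI (pvCodes lack ful)).map _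
  rw [pvMain, List.map_map]
  refine List.map_congr_left ?_
  intro a ha
  obtain ⟨lo, hi, rfl, h0, h1, h2, hd0, hd1⟩ := pvShape lack ful a ha
  simp only [Function.comp, hd0, hd1]
  rw [pvEncDiv lo hi _ (le_trans h0 h1) h2, pvEncMod lo hi _ (le_trans h0 h1) h2]
  simp

-- ===== VERDICT (by name: the statement is the Claim_ definition above) =====
theorem duo_requirements_matching_spec : Claim_equal_duo_requirements_matching := by
  intro lack ful names _ _
  exact pvOut_eq lack ful names
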